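-- pv_equiv track=rewrite | github.com/ystemsrx/campus-login | SWU/encrypt.py | _get_key_bytes_js
-- ===== SOURCE A (Python) =====
-- def _str_to_bt_js(str_block):
--     bt = [0] * 64
--     leng = len(str_block)
--     if leng < 4:
--         for i in range(leng):
--             k = ord(str_block[i])
--             for j in range(16):
--                 # 2^(15-j)
--                 pow2 = 1 << (15 - j)
--                 bt[16 * i + j] = (k // pow2) % 2
--     else:
--         for i in range(4):
--             k = ord(str_block[i])
--             for j in range(16):
--                 pow2 = 1 << (15 - j)
--                 bt[16 * i + j] = (k // pow2) % 2
--     return bt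
--
-- def _get_key_bytes_js(key):
--     key_bytes = []
--     leng = len(key)
--     iterator = leng // 4
--     remainder = leng % 4
--     for i in range(iterator):
--         key_bytes.append(_str_to_bt_js(key[i * 4:(i + 1) * 4]))
--     if remainder > 0:
--         key_bytes.append(_str_to_bt_js(key[iterator * 4:]))
--     return key_bytes
-- ===== SOURCE B (Python) =====
-- def _get_key_bytes_js(key):
--     n = len(key)
--     out = []
--     for start in range(0, n, 4):
--         val = 0
--         for off in range(4):
--             val = val * 65536 + (ord(key[start + off]) if start + off < n else 0)
--         bits = []
--         for _ in range(64):
--             bits.append(val % 2)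
--             val //= 2
--         bits.reverse()
--         out.append(bits)
--     return out
-- ===== Notes on version B (the rewrite author's own statement) =====
-- stated objective: alternative
-- what changed: Instead of A's positional bit extraction ((ord//2^(15-j))%2 written by index into a preallocated 64-zero array, with separate full-chunk and remainder branches), B packs each 4-char block (zero-padded) into a single base-65536 integer accumulator and then peels off its 64 bits least-significant-first by repeated divmod 2, reversing the list at the end.
import Mathlib
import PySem

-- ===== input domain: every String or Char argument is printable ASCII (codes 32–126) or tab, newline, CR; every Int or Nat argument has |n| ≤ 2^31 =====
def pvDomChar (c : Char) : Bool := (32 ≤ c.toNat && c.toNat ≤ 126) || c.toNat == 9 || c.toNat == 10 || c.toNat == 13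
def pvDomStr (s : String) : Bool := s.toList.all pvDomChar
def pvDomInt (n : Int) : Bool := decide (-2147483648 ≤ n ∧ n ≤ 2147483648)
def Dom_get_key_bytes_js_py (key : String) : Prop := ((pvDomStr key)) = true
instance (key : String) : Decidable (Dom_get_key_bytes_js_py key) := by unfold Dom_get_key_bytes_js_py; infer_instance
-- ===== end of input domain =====

-- B packs each (zero-padded) 4-char block into one base-65536 integer and peels its 64 bits
-- LSB-first by repeated divmod 2, reversing at the end — replacing A's per-bit positional
-- writes into a preallocated array and its full-chunk/remainder branches; same values.

-- ===== PORT A =====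
-- port of _str_to_bt_js (strings handled as List Char; bt[idx] = v is List.set)
def strToBtJs (str_block : List Char) : List Int :=
  let bt : List Int := List.replicate 64 0
  let leng := str_block.length
  if leng < 4 then
    (List.range leng).foldl (fun bt i =>
      let k : Int := ((str_block.getD i ' ').toNat : Int)
      (List.range 16).foldl (fun bt j =>
        let pow2 : Int := 2 ^ (15 - j)
        bt.set (16 * i + j) (PySem.Int.mod (PySem.Int.floordiv k pow2) 2)) bt) bt
  else
    (List.range 4).foldl (fun bt i =>
      let k : Int := ((str_block.getD i ' ').toNat : Int)
      (List.range 16).foldl (fun bt j =>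
        let pow2 : Int := 2 ^ (15 - j)
        bt.set (16 * i + j) (PySem.Int.mod (PySem.Int.floordiv k pow2) 2)) bt) bt

def get_key_bytes_js_py (key : String) : List (List Int) :=
  let s := key.toList
  let leng : Int := PySem.Str.len key
  let iterator := PySem.Int.floordiv leng 4
  let remainder := PySem.Int.mod leng 4
  let key_bytes : List (List Int) :=
    (PySem.List.pyRange 0 iterator 1).foldl (fun acc i =>
      acc ++ [strToBtJs (PySem.List.slice s (some (i * 4)) (some ((i + 1) * 4)))]) []
  if remainder > 0 then
    key_bytes ++ [strToBtJs (PySem.List.slice s (some (iterator * 4)) none)]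
  else key_bytes

-- ===== PORT B =====
def get_key_bytes_js_py_alt (key : String) : List (List Int) :=
  let s := key.toList
  let n : Int := PySem.Str.len key
  (PySem.List.pyRange 0 n 4).foldl (fun out start =>
    let val : Int := (PySem.List.pyRange 0 4 1).foldl (fun val off =>
      val * 65536 + (if start + off < n
                     then (((PySem.List.pyGet? s (start + off)).getD ' ').toNat : Int)
                     else 0)) 0
    let p := (List.range 64).foldl (fun (p : List Int × Int) _ =>
      (p.1 ++ [PySem.Int.mod p.2 2], PySem.Int.floordiv p.2 2)) (([] : List Int), val)
    out ++ [p.1.reverse]) []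

-- ===== PRECONDITION & SPEC =====
def Spec_get_key_bytes_js_py (key : String) (out : List (List Int)) : Prop := out = get_key_bytes_js_py_alt key
instance (key : String) (out : List (List Int)) : Decidable (Spec_get_key_bytes_js_py key out) := by unfold Spec_get_key_bytes_js_py; infer_instance

-- ===== CLAIM (what is proved, stated in full; the proofs are below) =====
def Claim_equal_get_key_bytes_js_py : Prop := ∀ (key : String), Dom_get_key_bytes_js_py key → Spec_get_key_bytes_js_py key (get_key_bytes_js_py key)

-- ===== LEMMAS AND PROOFS =====

-- the A-shaped block built from one ≤4-char chunk: flat big-endian bits, zero-padded to 64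
def pvBlockOf (cs : List Char) : List Int :=
  let bits : List Int := cs.flatMap (fun c =>
    (List.range 16).map (fun j =>
      PySem.Int.mod (PySem.Int.floordiv ((c.toNat : Int)) (2 ^ (15 - j))) 2))
  bits ++ List.replicate (64 - bits.length) 0

-- the canonical form both ports are reduced to: one block per 4-char chunk
def pvCanon (s : List Char) (m : Nat) : List (List Int) :=
  (List.range m).map (fun k => pvBlockOf (List.take 4 (List.drop (4 * k) s)))

-- char code at index i, 0 beyond the end (B's zero padding)
def pvKpad (cs : List Char) (i : Nat) : Nat := ((cs[i]?).map Char.toNat).getD 0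

-- the base-65536 value B packs a chunk into
def pvValOf (cs : List Char) : Nat :=
  ((pvKpad cs 0 * 65536 + pvKpad cs 1) * 65536 + pvKpad cs 2) * 65536 + pvKpad cs 3

-- the n low bits of v, least significant first
def pvLsb (n v : Nat) : List Int := (List.range n).map (fun t => ((v / 2 ^ t % 2 : Nat) : Int))

-- writing g 0 .. g (m-1) at positions base .. base+m-1 replaces that segment
lemma pv_seg_gen (g : Nat → Int) (m base : Nat) (bt : List Int) (h : base + m ≤ bt.length) :
    (List.range m).foldl (fun bt j => bt.set (base + j) (g j)) bt
      = bt.take base ++ (List.range m).map g ++ bt.drop (base + m) := by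
  induction m with
  | zero => simp [List.take_append_drop]
  | succ m ih =>
    have hlt : base + m < bt.length := by omega
    have htl : (bt.take base).length = base := by simp; omega
    rw [List.range_succ, List.foldl_append, List.foldl_cons, List.foldl_nil,
        ih (by omega), List.map_append, List.append_assoc,
        List.set_append, htl, if_neg (by omega), Nat.add_sub_cancel_left,
        List.set_append, List.length_map, List.length_range, if_neg (by omega), Nat.sub_self,
        List.drop_eq_getElem_cons hlt, List.set_cons_zero]
    simp [List.append_assoc]
    omega

-- the inner 16-bit loop of A, as a segment write
lemma pv_seg (c : Char) (base : Nat) (bt : List Int) (h : base + 16 ≤ bt.length) :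
    (List.range 16).foldl (fun bt j =>
        bt.set (base + j) (PySem.Int.mod (PySem.Int.floordiv ((c.toNat : Int)) (2 ^ (15 - j))) 2)) bt
      = bt.take base
          ++ (List.range 16).map (fun j => PySem.Int.mod (PySem.Int.floordiv ((c.toNat : Int)) (2 ^ (15 - j))) 2)
          ++ bt.drop (base + 16) :=
  pv_seg_gen _ 16 base bt h

-- A's outer per-char loop fills the first 16*L positions with the flat bit list
lemma pv_loop (cs : List Char) (L : Nat) (bt : List Int) (h : 16 * L ≤ bt.length) :
    (List.range L).foldl (fun bt i =>
        (List.range 16).foldl (fun bt j =>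
          bt.set (16 * i + j)
            (PySem.Int.mod (PySem.Int.floordiv (((cs.getD i ' ').toNat : Int)) (2 ^ (15 - j)))
              2)) bt) bt
      = (List.range L).flatMap (fun i =>
          (List.range 16).map (fun j =>
            PySem.Int.mod (PySem.Int.floordiv (((cs.getD i ' ').toNat : Int)) (2 ^ (15 - j))) 2))
          ++ bt.drop (16 * L) := by
  induction L with
  | zero => simp
  | succ L ih =>
    rw [List.range_succ (n := L), List.foldl_append, List.foldl_cons, List.foldl_nil,
        ih (by omega)]
    have hlen : ((List.range L).flatMap (fun i =>
        (List.range 16).map (fun j =>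
          PySem.Int.mod (PySem.Int.floordiv (((cs.getD i ' ').toNat : Int)) (2 ^ (15 - j))) 2))).length
        = 16 * L := by
      simp [List.length_flatMap, List.map_const']
      ring
    rw [pv_seg (cs.getD L ' ') (16 * L) _ (by simp [List.length_flatMap, List.map_const']; omega),
        List.take_left' hlen, List.flatMap_append, ← List.drop_drop, List.drop_left' hlen,
        List.drop_drop]
    have h16 : 16 * L + 16 = 16 * (L + 1) := by ring
    rw [h16]
    simp [List.append_assoc]

-- generic: indexing a list by range over its length is the list itself (flatMap form)
lemma pv_flat_gen (F : Char → List Int) (cs : List Char) (L : Nat) (hL : L = cs.length) :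
    (List.range L).flatMap (fun i => F (cs.getD i ' ')) = cs.flatMap F := by
  subst hL
  have hmap : (List.range cs.length).map (fun i => cs.getD i ' ') = cs := by
    apply List.ext_getElem
    · simp
    · intro i h1 h2
      simp [List.getD_eq_getElem?_getD, List.getElem?_eq_getElem h2]
  calc (List.range cs.length).flatMap (fun i => F (cs.getD i ' '))
      = ((List.range cs.length).map (fun i => cs.getD i ' ')).flatMap F := by
        rw [List.flatMap_map]
    _ = cs.flatMap F := by rw [hmap]

-- the concrete instance used below (first-order, so rw can apply it)
lemma pv_flat (cs : List Char) (L : Nat) (hL : L = cs.length) :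
    (List.range L).flatMap (fun i =>
        (List.range 16).map (fun j =>
          PySem.Int.mod (PySem.Int.floordiv (((cs.getD i ' ').toNat : Int)) (2 ^ (15 - j))) 2))
      = cs.flatMap (fun c =>
          (List.range 16).map (fun j =>
            PySem.Int.mod (PySem.Int.floordiv ((c.toNat : Int)) (2 ^ (15 - j))) 2)) :=
  pv_flat_gen (fun c =>
    (List.range 16).map (fun j =>
      PySem.Int.mod (PySem.Int.floordiv ((c.toNat : Int)) (2 ^ (15 - j))) 2)) cs L hL

-- A's helper equals the canonical block on every chunk A ever passes (length ≤ 4)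
lemma strToBt_eq_blockOf (cs : List Char) (h : cs.length ≤ 4) :
    strToBtJs cs = pvBlockOf cs := by
  have hbits : (cs.flatMap (fun c =>
      (List.range 16).map (fun j =>
        PySem.Int.mod (PySem.Int.floordiv ((c.toNat : Int)) (2 ^ (15 - j))) 2))).length
      = 16 * cs.length := by
    simp [List.length_flatMap, List.map_const']
    ring
  simp only [strToBtJs, pvBlockOf]
  by_cases hc : cs.length < 4
  · rw [if_pos hc, pv_loop cs cs.length _ (by simp; omega), List.drop_replicate,
        pv_flat cs cs.length rfl, hbits]
  · have h4 : cs.length = 4 := by omega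
    rw [if_neg hc, pv_loop cs 4 _ (by simp), List.drop_replicate, pv_flat cs 4 h4.symm, hbits, h4]

-- helper arithmetic: Python // and % through Nat casts
lemma pv_fdiv_cast (a b : Nat) : PySem.Int.floordiv (a : Int) (b : Int) = ((a / b : Nat) : Int) := by
  simp [PySem.Int.floordiv, Int.fdiv_eq_ediv]

lemma pv_fmod_cast (a b : Nat) : PySem.Int.mod (a : Int) (b : Int) = ((a % b : Nat) : Int) := by
  simp [PySem.Int.mod, Int.fmod_eq_emod]

lemma pv_fdiv (n : Nat) : PySem.Int.floordiv (n : Int) 4 = ((n / 4 : Nat) : Int) := by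
  simp [PySem.Int.floordiv, Int.fdiv_eq_ediv]

lemma pv_fmod (n : Nat) : PySem.Int.mod (n : Int) 4 = ((n % 4 : Nat) : Int) := by
  simp [PySem.Int.mod, Int.fmod_eq_emod]

-- A reduces to the canonical chunk map plus an explicit remainder block
lemma pvA_canon (key : String) :
    get_key_bytes_js_py key
      = pvCanon key.toList (key.toList.length / 4)
        ++ (if 0 < key.toList.length % 4 then
              [pvBlockOf (List.take 4 (List.drop (4 * (key.toList.length / 4)) key.toList))]
            else []) := by
  simp only [get_key_bytes_js_py, PySem.Str.len_eq, pv_fdiv, pv_fmod,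
    PySem.List.foldl_append_singleton_eq_map, PySem.List.pyRange_one, List.map_map, List.nil_append]
  set s := key.toList with hs
  set n := s.length with hsn
  have hrange : ((((n / 4 : Nat) : Int)) - 0).toNat = n / 4 := by omega
  rw [hrange]
  have hmapeq : ∀ k ∈ List.range (n / 4),
      strToBtJs (PySem.List.slice s (some ((0 + (k : Int)) * 4)) (some ((0 + (k : Int) + 1) * 4)))
        = pvBlockOf (List.take 4 (List.drop (4 * k) s)) := by
    intro k _
    have hc1 : (0 + (k : Int)) * 4 = ((4 * k : Nat) : Int) := by push_cast; ring
    have hc2 : (0 + (k : Int) + 1) * 4 = ((4 * k : Nat) : Int) + ((4 : Nat) : Int) := by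
      push_cast; ring
    rw [hc1, hc2, PySem.List.slice_natCast_add]
    exact strToBt_eq_blockOf _ (by simp)
  rw [Function.comp_def, List.map_congr_left hmapeq]
  by_cases hr : 0 < n % 4
  · rw [if_pos (by exact_mod_cast hr), if_pos hr]
    have hc3 : ((n / 4 : Nat) : Int) * 4 = ((n / 4 * 4 : Nat) : Int) := by push_cast; ring
    rw [hc3, PySem.List.slice_from_natCast,
        strToBt_eq_blockOf _ (by simp; omega)]
    have : List.take 4 (List.drop (4 * (n / 4)) s) = List.drop (n / 4 * 4) s := by
      rw [Nat.mul_comm 4 (n / 4)]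
      exact List.take_of_length_le (by simp; omega)
    rw [this]
    rfl
  · rw [if_neg (by exact_mod_cast hr), if_neg hr, List.append_nil]
    rfl

-- ===== B-side lemmas =====

-- bit-split: low part
lemma pv_split_lo (a b m t : Nat) (ht : t < m) :
    (a * 2 ^ m + b) / 2 ^ t % 2 = b / 2 ^ t % 2 := by
  have hm : (2 : Nat) ^ m = (2 ^ (m - t - 1) * 2) * 2 ^ t := by
    rw [← pow_succ, ← pow_add]
    congr 1
    omega
  rw [hm, ← mul_assoc, mul_comm (a * (2 ^ (m - t - 1) * 2)) (2 ^ t),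
      Nat.mul_add_div (Nat.two_pow_pos t)]
  have he : a * (2 ^ (m - t - 1) * 2) = 2 * (a * 2 ^ (m - t - 1)) := by ring
  rw [he]
  omega

-- bit-split: high part
lemma pv_split_hi (a b m t : Nat) (hb : b < 2 ^ m) :
    (a * 2 ^ m + b) / 2 ^ (m + t) % 2 = a / 2 ^ t % 2 := by
  rw [pow_add, ← Nat.div_div_eq_div_mul, mul_comm a,
      Nat.mul_add_div (Nat.two_pow_pos m), Nat.div_eq_of_lt hb, Nat.add_zero]

-- pvLsb splits along a base-2^m digit boundary
lemma pv_lsb_split (a b m n : Nat) (hb : b < 2 ^ m) :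
    pvLsb (m + n) (a * 2 ^ m + b) = pvLsb m b ++ pvLsb n a := by
  unfold pvLsb
  rw [List.range_add, List.map_append, List.map_map]
  congr 1
  · exact List.map_congr_left (fun t ht => by
      rw [List.mem_range] at ht
      rw [pv_split_lo a b m t ht])
  · exact List.map_congr_left (fun t _ => by
      simp only [Function.comp_apply]
      rw [pv_split_hi a b m t hb])

-- reversing a map over a range reads it back-to-front
lemma pv_rev_map (f : Nat → Int) (n : Nat) :
    ((List.range n).map f).reverse = (List.range n).map (fun j => f (n - 1 - j)) := by
  apply List.ext_getElem
  · simp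
  · intro i h1 h2
    simp [List.getElem_reverse]

-- the reversed 16 low bits are A's big-endian 16-bit pattern (in Nat form)
def pvRev16 (k : Nat) : List Int := (List.range 16).map (fun j => ((k / 2 ^ (15 - j) % 2 : Nat) : Int))

lemma pv_rev16 (k : Nat) : (pvLsb 16 k).reverse = pvRev16 k := by
  unfold pvLsb pvRev16
  rw [pv_rev_map]

-- A's per-char 16-bit map, rewritten through Nat casts
lemma pv_g_cast (c : Char) :
    (List.range 16).map (fun j =>
        PySem.Int.mod (PySem.Int.floordiv ((c.toNat : Int)) (2 ^ (15 - j))) 2)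
      = pvRev16 c.toNat := by
  unfold pvRev16
  apply List.map_congr_left
  intro j _
  have h1 : ((2 : Int) ^ (15 - j)) = (((2 ^ (15 - j) : Nat)) : Int) := by push_cast; ring
  have h2 : (2 : Int) = ((2 : Nat) : Int) := by norm_num
  rw [h1, pv_fdiv_cast, h2, pv_fmod_cast]

lemma pv_rev16_zero : pvRev16 0 = List.replicate 16 0 := by decide

-- B's 64-step divmod loop computes the low bits, LSB first
lemma pv_bitsfold (n v : Nat) (bs : List Int) :
    (List.range n).foldl (fun (p : List Int × Int) _ =>
        (p.1 ++ [PySem.Int.mod p.2 2], PySem.Int.floordiv p.2 2)) (bs, ((v : Nat) : Int))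
      = (bs ++ pvLsb n v, ((v / 2 ^ n : Nat) : Int)) := by
  induction n with
  | zero => simp [pvLsb]
  | succ n ih =>
    rw [List.range_succ, List.foldl_append, ih, List.foldl_cons, List.foldl_nil]
    have h2 : (2 : Int) = ((2 : Nat) : Int) := by norm_num
    have hmod : PySem.Int.mod ((v / 2 ^ n : Nat) : Int) 2 = ((v / 2 ^ n % 2 : Nat) : Int) := by
      rw [h2, pv_fmod_cast]
    have hdiv : PySem.Int.floordiv ((v / 2 ^ n : Nat) : Int) 2 = ((v / 2 ^ (n + 1) : Nat) : Int) := by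
      rw [h2, pv_fdiv_cast, Nat.div_div_eq_div_mul, ← pow_succ]
    rw [hmod, hdiv]
    have hlsb : pvLsb (n + 1) v = pvLsb n v ++ [((v / 2 ^ n % 2 : Nat) : Int)] := by
      unfold pvLsb; rw [List.range_succ, List.map_append, List.map_cons, List.map_nil]
    rw [hlsb, List.append_assoc]

-- the reversed 64 low bits of a packed 4-digit base-65536 value, digit by digit
lemma pv_lsb64 (k0 k1 k2 k3 : Nat) (h1 : k1 < 65536) (h2 : k2 < 65536) (h3 : k3 < 65536) :
    (pvLsb 64 (((k0 * 65536 + k1) * 65536 + k2) * 65536 + k3)).reverse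
      = pvRev16 k0 ++ (pvRev16 k1 ++ (pvRev16 k2 ++ pvRev16 k3)) := by
  have h16 : (65536 : Nat) = 2 ^ 16 := by norm_num
  have hval : ((k0 * 65536 + k1) * 65536 + k2) * 65536 + k3
      = k0 * 2 ^ 48 + (k1 * 2 ^ 32 + (k2 * 2 ^ 16 + k3)) := by
    rw [h16]; ring
  have hb3 : k3 < 2 ^ 16 := by omega
  have hb2 : k2 * 2 ^ 16 + k3 < 2 ^ 32 := by rw [h16] at h2; nlinarith
  have hb1 : k1 * 2 ^ 32 + (k2 * 2 ^ 16 + k3) < 2 ^ 48 := by rw [h16] at h1; nlinarith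
  rw [hval, show (64 : Nat) = 48 + 16 from rfl, pv_lsb_split k0 _ 48 16 hb1,
      show (48 : Nat) = 32 + 16 from rfl, pv_lsb_split k1 _ 32 16 hb2,
      show (32 : Nat) = 16 + 16 from rfl, pv_lsb_split k2 _ 16 16 hb3]
  simp [List.reverse_append, pv_rev16]

-- reversing the 64 low bits of the packed chunk value gives the canonical block
lemma pv_blockB (cs : List Char) (hlen : cs.length ≤ 4) (hc : ∀ c ∈ cs, c.toNat < 65536) :
    (pvLsb 64 (pvValOf cs)).reverse = pvBlockOf cs := by
  rcases cs with _ | ⟨a, _ | ⟨b, _ | ⟨c, _ | ⟨d, tl⟩⟩⟩⟩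
  · rw [show pvValOf [] = ((0 * 65536 + 0) * 65536 + 0) * 65536 + 0 from rfl,
        pv_lsb64 0 0 0 0 (by norm_num) (by norm_num) (by norm_num), pv_rev16_zero]
    simp only [pvBlockOf, List.flatMap_nil, List.length_nil, List.nil_append]
    decide
  · rw [show pvValOf [a] = ((a.toNat * 65536 + 0) * 65536 + 0) * 65536 + 0 from rfl,
        pv_lsb64 a.toNat 0 0 0 (by norm_num) (by norm_num) (by norm_num), pv_rev16_zero]
    simp only [pvBlockOf, List.flatMap_cons, List.flatMap_nil, List.append_nil, pv_g_cast]
    rw [show ((pvRev16 a.toNat).length : Nat) = 16 from by unfold pvRev16; simp,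
        show (64 - 16 : Nat) = 48 from rfl,
        show (List.replicate 48 (0 : Int)) = List.replicate 16 0 ++ (List.replicate 16 0 ++ List.replicate 16 0) from by decide]
  · rw [show pvValOf [a, b] = ((a.toNat * 65536 + b.toNat) * 65536 + 0) * 65536 + 0 from rfl,
        pv_lsb64 a.toNat b.toNat 0 0 (hc b (by simp)) (by norm_num) (by norm_num), pv_rev16_zero]
    simp only [pvBlockOf, List.flatMap_cons, List.flatMap_nil, List.append_nil, pv_g_cast]
    rw [show (((pvRev16 a.toNat) ++ (pvRev16 b.toNat)).length : Nat) = 32 from by unfold pvRev16; simp,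
        show (64 - 32 : Nat) = 32 from rfl,
        show (List.replicate 32 (0 : Int)) = List.replicate 16 0 ++ List.replicate 16 0 from by decide]
    simp [List.append_assoc]
  · rw [show pvValOf [a, b, c] = ((a.toNat * 65536 + b.toNat) * 65536 + c.toNat) * 65536 + 0 from rfl,
        pv_lsb64 a.toNat b.toNat c.toNat 0 (hc b (by simp)) (hc c (by simp)) (by norm_num), pv_rev16_zero]
    simp only [pvBlockOf, List.flatMap_cons, List.flatMap_nil, List.append_nil, pv_g_cast]
    rw [show (((pvRev16 a.toNat) ++ ((pvRev16 b.toNat) ++ (pvRev16 c.toNat))).length : Nat) = 48 from by unfold pvRev16; simp,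
        show (64 - 48 : Nat) = 16 from rfl]
    simp [List.append_assoc]
  · have htl : tl = [] := by simp at hlen; exact List.eq_nil_of_length_eq_zero (by omega)
    subst htl
    rw [show pvValOf [a, b, c, d] = ((a.toNat * 65536 + b.toNat) * 65536 + c.toNat) * 65536 + d.toNat from rfl,
        pv_lsb64 a.toNat b.toNat c.toNat d.toNat (hc b (by simp)) (hc c (by simp)) (hc d (by simp))]
    simp only [pvBlockOf, List.flatMap_cons, List.flatMap_nil, List.append_nil, pv_g_cast]
    rw [show (((pvRev16 a.toNat) ++ ((pvRev16 b.toNat) ++ ((pvRev16 c.toNat) ++ (pvRev16 d.toNat)))).length : Nat) = 64 from by unfold pvRev16; simp,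
        show (64 - 64 : Nat) = 0 from rfl]
    simp

-- B's guarded lookup at index j is pvKpad of the whole string
lemma pv_lookup (s : List Char) (j : Nat) :
    (if ((j : Nat) : Int) < ((s.length : Nat) : Int)
     then (((PySem.List.pyGet? s ((j : Nat) : Int)).getD ' ').toNat : Int) else 0)
      = ((pvKpad s j : Nat) : Int) := by
  by_cases h : j < s.length
  · rw [if_pos (by exact_mod_cast h), PySem.List.pyGet?_natCast, List.getElem?_eq_getElem h]
    simp [pvKpad, List.getElem?_eq_getElem h]
  · rw [if_neg (by exact_mod_cast h), pvKpad, List.getElem?_eq_none (by omega)]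
    simp

-- padded chunk lookup = padded whole-string lookup
lemma pv_kpad_chunk (s : List Char) (k off : Nat) (hoff : off < 4) :
    pvKpad (List.take 4 (List.drop (4 * k) s)) off = pvKpad s (4 * k + off) := by
  simp [pvKpad, List.getElem?_take_of_lt hoff, List.getElem?_drop]

-- B reduces to the canonical chunk map over ⌈n/4⌉ chunks
lemma pvB_canon (key : String) (hdom : Dom_get_key_bytes_js_py key) :
    get_key_bytes_js_py_alt key = pvCanon key.toList ((key.toList.length + 3) / 4) := by
  have hcode : ∀ c ∈ key.toList, c.toNat < 65536 := by
    intro c hc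
    have := List.all_eq_true.mp hdom c hc
    simp [pvDomChar] at this
    omega
  simp only [get_key_bytes_js_py_alt, PySem.List.foldl_append_singleton_eq_map, List.nil_append]
  rw [PySem.Str.len_eq]
  rw [PySem.List.pyRange_of_pos 0 ((key.toList.length : Nat) : Int) (by omega : (0 : Int) < 4),
      List.map_map]
  have hcnt : (if (0 : Int) < ((key.toList.length : Nat) : Int)
        then ((((key.toList.length : Nat) : Int) - 0 + 4 - 1) / 4).toNat else 0)
      = (key.toList.length + 3) / 4 := by split <;> omega
  rw [hcnt]
  unfold pvCanon
  apply List.map_congr_left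
  intro k _
  simp only [Function.comp_apply]
  have hstart : (0 : Int) + 4 * (k : Int) = ((4 * k : Nat) : Int) := by push_cast; ring
  rw [hstart]
  have hval : (PySem.List.pyRange 0 4 1).foldl (fun val off =>
      val * 65536 + (if ((4 * k : Nat) : Int) + off < ((key.toList.length : Nat) : Int)
                     then (((PySem.List.pyGet? key.toList (((4 * k : Nat) : Int) + off)).getD ' ').toNat : Int)
                     else 0)) 0
      = ((pvValOf (List.take 4 (List.drop (4 * k) key.toList)) : Nat) : Int) := by
    rw [show PySem.List.pyRange 0 4 1 = [0, 1, 2, 3] from by decide]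
    simp only [List.foldl_cons, List.foldl_nil]
    rw [show ((4 * k : Nat) : Int) + 0 = ((4 * k + 0 : Nat) : Int) from by push_cast; ring,
        show ((4 * k : Nat) : Int) + 1 = ((4 * k + 1 : Nat) : Int) from by push_cast; ring,
        show ((4 * k : Nat) : Int) + 2 = ((4 * k + 2 : Nat) : Int) from by push_cast; ring,
        show ((4 * k : Nat) : Int) + 3 = ((4 * k + 3 : Nat) : Int) from by push_cast; ring,
        pv_lookup key.toList (4 * k + 0), pv_lookup key.toList (4 * k + 1),
        pv_lookup key.toList (4 * k + 2), pv_lookup key.toList (4 * k + 3)]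
    unfold pvValOf
    rw [pv_kpad_chunk key.toList k 0 (by norm_num), pv_kpad_chunk key.toList k 1 (by norm_num),
        pv_kpad_chunk key.toList k 2 (by norm_num), pv_kpad_chunk key.toList k 3 (by norm_num)]
    push_cast
    ring
  rw [hval, pv_bitsfold]
  simp only [List.nil_append]
  exact pv_blockB _ (by simp) (fun c hc =>
    hcode c (List.mem_of_mem_drop (List.mem_of_mem_take hc)))

theorem pv_main (key : String) (hdom : Dom_get_key_bytes_js_py key) :
    get_key_bytes_js_py key = get_key_bytes_js_py_alt key := by
  rw [pvA_canon, pvB_canon key hdom]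
  set s := key.toList
  set n := s.length
  by_cases hr : 0 < n % 4
  · rw [if_pos hr, show (n + 3) / 4 = n / 4 + 1 from by omega]
    simp only [pvCanon, List.range_succ, List.map_append, List.map_cons, List.map_nil]
  · rw [if_neg hr, show (n + 3) / 4 = n / 4 from by omega, List.append_nil]

-- ===== VERDICT (by name: the statement is the Claim_ definition above) =====
theorem get_key_bytes_js_py_spec : Claim_equal_get_key_bytes_js_py := by
  intro key hdom
  exact pv_main key hdom
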